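-- pv_equiv track=rewrite | github.com/ivansbob/1solana-coin-signal-engine | utils/bundle_contract_fields.py | _copy_fields
-- ===== SOURCE A (Python) =====
-- from typing import Any
--
-- def _copy_fields(fields: list[str], source: dict[str, Any], fallback: dict[str, Any]) -> dict[str, Any]:
--     output: dict[str, Any] = {}
--     for field in fields:
--         if field in source:
--             output[field] = source.get(field)
--         else:
--             output[field] = fallback.get(field)
--     return output
-- ===== SOURCE B (Python) =====
-- def _copy_fields(fields, source, fallback):
--     # Staged passes: fill everything from fallback first, then overwrite from
--     # source by scanning source's items (only keys that were requested).
--     output = {f: fallback.get(f) for f in fields}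
--     wanted = set(output)
--     for k, v in source.items():
--         if k in wanted:
--             output[k] = v
--     return output
-- ===== Notes on version B (the rewrite author's own statement) =====
-- stated objective: alternative
-- what changed: B removes A's per-field membership branch between the two dicts: it first fills the whole output from fallback in one pass over fields, then scans source.items() once, overwriting the requested keys, so source is traversed as data instead of being probed per field.
-- outside the precondition, e.g. on _copy_fields(['x'], {}, {}): A returns {'x': None}, B returns {'x': None}
import Mathlib
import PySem

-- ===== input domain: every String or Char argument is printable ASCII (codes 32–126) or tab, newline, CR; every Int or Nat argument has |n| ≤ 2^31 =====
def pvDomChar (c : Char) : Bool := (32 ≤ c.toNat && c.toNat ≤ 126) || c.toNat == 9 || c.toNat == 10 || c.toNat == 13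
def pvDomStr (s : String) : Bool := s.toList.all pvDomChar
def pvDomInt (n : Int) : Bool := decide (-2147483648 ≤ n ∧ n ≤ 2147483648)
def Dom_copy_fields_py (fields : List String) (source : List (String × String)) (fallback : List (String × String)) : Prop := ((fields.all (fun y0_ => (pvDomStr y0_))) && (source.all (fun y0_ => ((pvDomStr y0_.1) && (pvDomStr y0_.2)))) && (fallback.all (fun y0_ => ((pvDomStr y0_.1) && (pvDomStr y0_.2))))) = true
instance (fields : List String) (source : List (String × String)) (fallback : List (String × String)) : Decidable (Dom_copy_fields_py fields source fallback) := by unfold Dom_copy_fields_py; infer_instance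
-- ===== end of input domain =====

-- B fills the output from fallback in one pass over fields, then scans source's items once,
-- overwriting the requested keys — no per-field membership branch between the two dicts (alternative).


-- ===== PORT A =====
-- output = {}; for field in fields: output[field] = source.get(field) if field in source else fallback.get(field)
-- (under Pre_ every looked-up key is present in the chosen dict, so the `.getD ""` default is never the result)
def copy_fields_py (fields : List String) (source : List (String × String)) (fallback : List (String × String)) : List (String × String) :=
  let src : PySem.Dict String String := PySem.Dict.ofList source
  let fb : PySem.Dict String String := PySem.Dict.ofList fallback
  (fields.foldl
    (fun (output : PySem.Dict String String) field =>
      if src.contains field then output.insert field (src.getD field "")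
      else output.insert field (fb.getD field ""))
    PySem.Dict.empty).items

-- ===== PORT B =====
-- output = {f: fallback.get(f) for f in fields}; wanted = set(output);
-- for k, v in source.items(): if k in wanted: output[k] = v;  return output
def copy_fields_py_alt (fields : List String) (source : List (String × String)) (fallback : List (String × String)) : List (String × String) :=
  let fb : PySem.Dict String String := PySem.Dict.ofList fallback
  let output0 : PySem.Dict String String :=
    fields.foldl (fun (o : PySem.Dict String String) f => o.insert f (fb.getD f "")) PySem.Dict.empty
  let wanted : PySem.Set String := PySem.Set.ofList output0.keys
  ((PySem.Dict.ofList source).items.foldl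
    (fun (o : PySem.Dict String String) kv =>
      if PySem.Set.contains wanted kv.1 then o.insert kv.1 kv.2 else o)
    output0).items

-- ===== PRECONDITION & SPEC =====
-- Pre_ excludes inputs where some requested field is in neither dict: there the Python (A and B alike)
-- stores None for it, a value the ports' String-valued result type cannot represent — a port-type
-- limitation, not a behavioural difference between A and B.
def Pre_copy_fields_py (fields : List String) (source : List (String × String)) (fallback : List (String × String)) : Prop :=
  (fields.all (fun f => source.any (fun p => p.1 == f) || fallback.any (fun p => p.1 == f))) = true
instance (fields : List String) (source : List (String × String)) (fallback : List (String × String)) : Decidable (Pre_copy_fields_py fields source fallback) := by unfold Pre_copy_fields_py; infer_instance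
def pvWitness_copy_fields_py : List String × (List (String × String)) × (List (String × String)) :=
  (["a", "b"], [("a", "1")], [("b", "2")])
def Spec_copy_fields_py (fields : List String) (source : List (String × String)) (fallback : List (String × String)) (out : List (String × String)) : Prop := out = copy_fields_py_alt fields source fallback
instance (fields : List String) (source : List (String × String)) (fallback : List (String × String)) (out : List (String × String)) : Decidable (Spec_copy_fields_py fields source fallback out) := by unfold Spec_copy_fields_py; infer_instance

-- ===== CLAIM (what is proved, stated in full; the proofs are below) =====
def Claim_equal_copy_fields_py : Prop := ∀ (fields : List String) (source : List (String × String)) (fallback : List (String × String)), Dom_copy_fields_py fields source fallback → Pre_copy_fields_py fields source fallback → Spec_copy_fields_py fields source fallback (copy_fields_py fields source fallback)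

-- ===== LEMMAS AND PROOFS =====

-- B's first pass: lookup in a foldl of unconditional inserts whose value depends only on the key.
theorem get?_foldl_insert_fun (g : String → String) :
    ∀ (l : List String) (d : PySem.Dict String String) (k : String),
      (l.foldl (fun o x => o.insert x (g x)) d).get? k
        = if k ∈ l then some (g k) else d.get? k := by
  intro l
  induction l with
  | nil => simp
  | cons a t ih =>
    intro d k
    simp only [List.foldl_cons, ih, List.mem_cons]
    by_cases ht : k ∈ t
    · simp [ht]
    · by_cases hk : k = a
      · subst hk; simp [ht, PySem.Dict.get?_insert_self]
      · simp [ht, hk, PySem.Dict.get?_insert_of_ne _ _ hk]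

-- B's second pass: a conditional-overwrite scan of an assoc list with distinct keys behaves as
-- "first try that list (when the key is wanted), else the accumulator".
theorem get?_foldl_cond_insert (wanted : PySem.Set String) :
    ∀ (l : List (String × String)), (l.map Prod.fst).Nodup →
      ∀ (d : PySem.Dict String String) (k : String),
      (l.foldl (fun o kv => if PySem.Set.contains wanted kv.1 then o.insert kv.1 kv.2 else o) d).get? k
        = if PySem.Set.contains wanted k
          then ((PySem.Dict.mk l).get? k).or (d.get? k)
          else d.get? k := by
  intro l
  induction l with
  | nil =>
    intro _ d k
    simp only [List.foldl_nil]
    by_cases hw : PySem.Set.contains wanted k = true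
    · rw [if_pos hw]
      have : (PySem.Dict.mk ([] : List (String × String))).get? k = none :=
        PySem.Dict.get?_empty k
      rw [this, Option.none_or]
    · rw [if_neg hw]
  | cons a t ih =>
    intro hnd d k
    have hnd' : (t.map Prod.fst).Nodup := (List.nodup_cons.mp hnd).2
    have ha : a.1 ∉ t.map Prod.fst := (List.nodup_cons.mp hnd).1
    have htnone : (PySem.Dict.mk t).get? a.1 = none := by
      rw [PySem.Dict.get?_eq_none_iff_not_mem_keys]
      simpa [PySem.Dict.keys] using ha
    simp only [List.foldl_cons]
    rw [ih hnd']
    by_cases hk : k = a.1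
    · subst hk
      by_cases hw : PySem.Set.contains wanted a.1 = true
      · rw [if_pos hw, if_pos hw, if_pos hw, htnone, Option.none_or,
            PySem.Dict.get?_insert_self, PySem.Dict.get?_mk_cons]
        simp
      · rw [if_neg hw, if_neg hw, if_neg hw]
    · have hne : (a.1 == k) = false := by simp [Ne.symm hk]
      have hstep : (if PySem.Set.contains wanted a.1 then d.insert a.1 a.2 else d).get? k
          = d.get? k := by
        by_cases hw : PySem.Set.contains wanted a.1 = true
        · rw [if_pos hw, PySem.Dict.get?_insert_of_ne _ _ hk]
        · rw [if_neg hw]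
      rw [hstep, PySem.Dict.get?_mk_cons]
      simp [hne]

-- B's second pass never adds a key: it only overwrites keys already present (wanted ⊆ d.keys).
theorem keys_foldl_cond_insert (wanted : PySem.Set String) :
    ∀ (l : List (String × String)) (d : PySem.Dict String String),
      (∀ k, PySem.Set.contains wanted k = true → d.contains k = true) →
      (l.foldl (fun o kv => if PySem.Set.contains wanted kv.1 then o.insert kv.1 kv.2 else o) d).keys
        = d.keys := by
  intro l
  induction l with
  | nil => intro d _; rfl
  | cons a t ih =>
    intro d h
    simp only [List.foldl_cons]
    by_cases hw : PySem.Set.contains wanted a.1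
    · rw [if_pos hw]
      have hc : d.contains a.1 = true := h a.1 hw
      rw [ih (d.insert a.1 a.2) (fun k hk => by
            rw [PySem.Dict.contains_insert]; simp [h k hk]),
          PySem.Dict.keys_insert_of_contains _ _ hc]
    · rw [if_neg hw]; exact ih d h

-- ===== VERDICT (by name: the statement is the Claim_ definition above) =====
theorem copy_fields_py_spec : Claim_equal_copy_fields_py := by
  intro fields source fallback _ _
  unfold Spec_copy_fields_py copy_fields_py copy_fields_py_alt
  dsimp only
  set src : PySem.Dict String String := PySem.Dict.ofList source with hsrc
  set fb : PySem.Dict String String := PySem.Dict.ofList fallback with hfb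
  -- A's loop, rewritten so the insert value is computed before the insert
  have hA : (fields.foldl
      (fun (output : PySem.Dict String String) field =>
        if src.contains field then output.insert field (src.getD field "")
        else output.insert field (fb.getD field "")) PySem.Dict.empty)
      = fields.foldl (fun (o : PySem.Dict String String) f =>
          o.insert f (if src.contains f then src.getD f "" else fb.getD f "")) PySem.Dict.empty := by
    congr 1
    funext o f
    by_cases h : src.contains f <;> simp [h]
  rw [hA]
  set DA : PySem.Dict String String :=
    fields.foldl (fun (o : PySem.Dict String String) f =>
      o.insert f (if src.contains f then src.getD f "" else fb.getD f "")) PySem.Dict.empty with hDA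
  set O0 : PySem.Dict String String :=
    fields.foldl (fun (o : PySem.Dict String String) f => o.insert f (fb.getD f "")) PySem.Dict.empty
    with hO0
  set wanted : PySem.Set String := PySem.Set.ofList O0.keys with hwanted
  set DB : PySem.Dict String String :=
    (PySem.Dict.ofList source).items.foldl
      (fun (o : PySem.Dict String String) kv =>
        if PySem.Set.contains wanted kv.1 then o.insert kv.1 kv.2 else o) O0 with hDB
  -- keys
  have hO0nd : O0.keys.Nodup := PySem.Dict.nodup_keys_foldl_insert _ _ _ PySem.Dict.nodup_keys_empty
  have hDAnd : DA.keys.Nodup := PySem.Dict.nodup_keys_foldl_insert _ _ _ PySem.Dict.nodup_keys_empty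
  have hwmem : ∀ k, PySem.Set.contains wanted k = true ↔ k ∈ O0.keys := by
    intro k
    rw [hwanted]
    constructor
    · intro h
      have : k ∈ PySem.Set.ofList O0.keys := by
        simpa [PySem.Set.contains] using h
      exact (PySem.Set.mem_ofList _ _).mp this
    · intro h
      simpa [PySem.Set.contains] using (PySem.Set.mem_ofList _ _).mpr h
  have hDBkeys : DB.keys = O0.keys := by
    rw [hDB]
    exact keys_foldl_cond_insert wanted _ O0
      (fun k hk => (PySem.Dict.contains_iff_mem_keys _ _).mpr ((hwmem k).mp hk))
  have hDBnd : DB.keys.Nodup := by rw [hDBkeys]; exact hO0nd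
  have hkeysO0 : O0.keys = PySem.Set.update (PySem.Dict.empty : PySem.Dict String String).keys fields := by
    rw [hO0]; exact PySem.Dict.keys_foldl_insert _ _ _
  have hkeysDA : DA.keys = O0.keys := by
    rw [hDA, hkeysO0]; exact PySem.Dict.keys_foldl_insert _ _ _
  have hmemfields : ∀ k, k ∈ O0.keys ↔ k ∈ fields := by
    intro k
    rw [hkeysO0]
    constructor
    · intro h; rcases (PySem.Set.mem_update _ _ _).mp h with h | h
      · simp [PySem.Dict.keys_empty] at h
      · exact h
    · intro h; exact (PySem.Set.mem_update _ _ _).mpr (Or.inr h)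
  -- per-key agreement on the common key set
  have hget : ∀ k ∈ O0.keys, DA.getD k "" = DB.getD k "" := by
    intro k hk
    have hkf : k ∈ fields := (hmemfields k).mp hk
    have hDAget : DA.get? k = some (if src.contains k then src.getD k "" else fb.getD k "") := by
      rw [hDA, get?_foldl_insert_fun _ fields _ k, if_pos hkf]
    have hO0get : O0.get? k = some (fb.getD k "") := by
      rw [hO0, get?_foldl_insert_fun _ fields _ k, if_pos hkf]
    have hsnd : (src.items.map Prod.fst).Nodup := by
      have := PySem.Dict.nodup_keys_ofList (ps := source) (κ := String) (ν := String)
      simpa [PySem.Dict.keys, hsrc] using this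
    have hDBget : DB.get? k = (src.get? k).or (O0.get? k) := by
      rw [hDB, get?_foldl_cond_insert wanted src.items hsnd O0 k,
          if_pos ((hwmem k).mpr hk)]
    have hDB' : DB.get? k = some (if src.contains k then src.getD k "" else fb.getD k "") := by
      rw [hDBget, hO0get]
      rcases h : src.get? k with _ | v
      · have hc : src.contains k = false := by
          rw [PySem.Dict.contains_eq_isSome_get?, h]; rfl
        simp [hc]
      · have hc : src.contains k = true := by
          rw [PySem.Dict.contains_eq_isSome_get?, h]; rfl
        simp [hc, PySem.Dict.getD_eq_get?_getD, h]
    rw [PySem.Dict.getD_eq_get?_getD, PySem.Dict.getD_eq_get?_getD, hDAget, hDB']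
  -- items equality
  have : DA.items = DB.items := by
    rw [PySem.Dict.items_eq_map_keys DA hDAnd "", PySem.Dict.items_eq_map_keys DB hDBnd "",
        hkeysDA, hDBkeys]
    exact List.map_congr_left (fun k hk => by rw [hget k hk])
  exact this
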